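-- pv_equiv track=rewrite | github.com/annyouu/atcorder | left_right/main.py | solution
-- ===== SOURCE A (Python) =====
-- def solution(nums):
--     n = len(nums)
--     result = [0] * n
--
--     for i in range(n):
--         # nums[i]から左へ広げる
--         left = i
--         while left > 0 and nums[left - 1] < nums[i]:
--             left -= 1
--
--         L = i - left + 1
--         # nums[i]から右へ広げる
--         right = i
--         while right < n - 1 and nums[right + 1] < nums[i]:
--             right += 1
--
--         R = right - i + 1
--         # 結果をカウントする
--         result[i] = L + R - 1
--
--     return result
-- ===== SOURCE B (Python) =====
-- def solution(nums):
--     n = len(nums)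
--     prev = []
--     stack = []
--     for i in range(n):
--         v = nums[i]
--         while stack and nums[stack[-1]] < v:
--             stack.pop()
--         prev.append(stack[-1] if stack else -1)
--         stack.append(i)
--     nxt = [0] * n
--     stack = []
--     for i in range(n - 1, -1, -1):
--         v = nums[i]
--         while stack and nums[stack[-1]] < v:
--             stack.pop()
--         nxt[i] = stack[-1] if stack else n
--         stack.append(i)
--     return [nxt[i] - prev[i] - 1 for i in range(n)]
-- ===== Notes on version B (the rewrite author's own statement) =====
-- stated objective: faster
-- what changed: Replaces A's per-index left/right linear expansion scans with two monotonic-stack passes that compute the nearest index with value >= nums[i] on each side, then takes their difference.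
import Mathlib
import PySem

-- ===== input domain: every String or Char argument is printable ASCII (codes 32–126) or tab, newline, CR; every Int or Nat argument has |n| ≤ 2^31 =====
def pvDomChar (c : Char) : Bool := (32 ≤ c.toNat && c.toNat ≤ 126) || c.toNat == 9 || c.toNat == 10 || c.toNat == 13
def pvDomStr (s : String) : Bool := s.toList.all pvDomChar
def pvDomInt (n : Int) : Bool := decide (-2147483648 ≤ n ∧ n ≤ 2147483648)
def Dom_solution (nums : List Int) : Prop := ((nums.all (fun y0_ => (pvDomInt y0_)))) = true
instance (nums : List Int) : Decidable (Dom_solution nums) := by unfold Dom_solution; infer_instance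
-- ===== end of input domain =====

-- B replaces A's per-index left/right expansion scans by two monotonic-stack passes
-- computing the nearest index with value ≥ nums[i] on each side.

-- ===== PORT A =====
-- A's inner `while left > 0 and nums[left-1] < nums[i]` loop; every index accessed is
-- in range, so `getD _ 0` is exact for Python's nums[...] here (likewise below).
def leftLoop (nums : List Int) (v : Int) : Nat → Nat
  | 0 => 0
  | l + 1 => if nums.getD l 0 < v then leftLoop nums v l else l + 1

-- A's inner `while right < n-1 and nums[right+1] < nums[i]` loop.
def rightLoop (nums : List Int) (v : Int) (n : Nat) (r : Nat) : Nat :=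
  if r < n - 1 ∧ nums.getD (r + 1) 0 < v then rightLoop nums v n (r + 1) else r
termination_by n - r
decreasing_by omega

def solution (nums : List Int) : List Int :=
  let n := nums.length
  (List.range n).map (fun i =>
    let v := nums.getD i 0
    let left := leftLoop nums v i
    let L : Int := (i : Int) - (left : Int) + 1
    let right := rightLoop nums v n i
    let R : Int := (right : Int) - (i : Int) + 1
    L + R - 1)

-- ===== PORT B =====
-- B's `while stack and nums[stack[-1]] < v: stack.pop()` loop (stack head = top).
def popWhile (nums : List Int) (v : Int) : List Nat → List Nat
  | [] => []
  | j :: s => if nums.getD j 0 < v then popWhile nums v s else j :: s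

-- forward pass of Source B: returns (stack, prev) after processing indices 0..i-1.
def fwd (nums : List Int) : Nat → (List Nat × List Int)
  | 0 => ([], [])
  | i + 1 =>
    let p := fwd nums i
    let v := nums.getD i 0
    let st := popWhile nums v p.1
    (i :: st, p.2 ++ [match st with | [] => -1 | j :: _ => (j : Int)])

-- backward pass of Source B: returns (stack, [nxt i, …, nxt (n-1)]) after processing n-1..i.
def bwd (nums : List Int) (n : Nat) (i : Nat) : (List Nat × List Int) :=
  if i < n then
    let p := bwd nums n (i + 1)
    let v := nums.getD i 0
    let st := popWhile nums v p.1
    (i :: st, (match st with | [] => (n : Int) | j :: _ => (j : Int)) :: p.2)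
  else ([], [])
termination_by n - i
decreasing_by omega

def solution_alt (nums : List Int) : List Int :=
  let n := nums.length
  let pr := (fwd nums n).2
  let nx := (bwd nums n 0).2
  (List.range n).map (fun i => nx.getD i 0 - pr.getD i 0 - 1)

-- ===== PRECONDITION & SPEC =====
def Spec_solution (nums : List Int) (out : List Int) : Prop := out = solution_alt nums
instance (nums : List Int) (out : List Int) : Decidable (Spec_solution nums out) := by unfold Spec_solution; infer_instance

-- ===== CLAIM (what is proved, stated in full; the proofs are below) =====
def Claim_equal_solution : Prop := ∀ (nums : List Int), Dom_solution nums → Spec_solution nums (solution nums)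

-- ===== LEMMAS AND PROOFS =====

-- stack after the forward pass has processed indices 0..i-1
def Sstk (nums : List Int) : Nat → List Nat
  | 0 => []
  | i + 1 => i :: popWhile nums (nums.getD i 0) (Sstk nums i)

-- stack after the backward pass has processed indices n-1..i
def Tstk (nums : List Int) (n : Nat) (i : Nat) : List Nat :=
  if i < n then i :: popWhile nums (nums.getD i 0) (Tstk nums n (i + 1)) else []
termination_by n - i
decreasing_by omega

-- least j ≥ i with nums[j] ≥ v, else n
def nIdx (nums : List Int) (n : Nat) (v : Int) (i : Nat) : Nat :=
  if i < n then (if nums.getD i 0 < v then nIdx nums n v (i + 1) else i) else n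
termination_by n - i
decreasing_by omega

def prevVal (nums : List Int) (k : Nat) : Int :=
  match popWhile nums (nums.getD k 0) (Sstk nums k) with
  | [] => -1
  | j :: _ => (j : Int)

def nxtVal (nums : List Int) (n : Nat) (k : Nat) : Int :=
  match popWhile nums (nums.getD k 0) (Tstk nums n (k + 1)) with
  | [] => (n : Int)
  | j :: _ => (j : Int)

theorem popWhile_cons (nums : List Int) (v : Int) (j : Nat) (s : List Nat) :
    popWhile nums v (j :: s) = if nums.getD j 0 < v then popWhile nums v s else j :: s := rfl

theorem popWhile_popWhile (nums : List Int) (v w : Int) (hw : w ≤ v) :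
    ∀ s, popWhile nums v (popWhile nums w s) = popWhile nums v s := by
  intro s
  induction s with
  | nil => rfl
  | cons j s ih =>
    by_cases h : nums.getD j 0 < w
    · have hv : nums.getD j 0 < v := lt_of_lt_of_le h hw
      rw [popWhile_cons nums w, if_pos h, ih, popWhile_cons, if_pos hv]
    · rw [popWhile_cons nums w, if_neg h]

theorem popWhile_Sstk (nums : List Int) :
    ∀ i v, popWhile nums v (Sstk nums i) = Sstk nums (leftLoop nums v i) := by
  intro i
  induction i with
  | zero => intro v; rfl
  | succ i ih =>
    intro v
    by_cases h : nums.getD i 0 < v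
    · rw [Sstk, popWhile_cons, if_pos h,
        popWhile_popWhile nums v (nums.getD i 0) (le_of_lt h), ih v]
      conv_rhs => rw [leftLoop]
      rw [if_pos h]
    · rw [Sstk, popWhile_cons, if_neg h]
      conv_rhs => rw [leftLoop]
      rw [if_neg h]
      conv_rhs => rw [Sstk]

theorem popWhile_Tstk (nums : List Int) (n : Nat) :
    ∀ k i, n - i ≤ k → ∀ v, popWhile nums v (Tstk nums n i) = Tstk nums n (nIdx nums n v i) := by
  intro k
  induction k with
  | zero =>
    intro i hik v
    have hin : ¬ i < n := by omega
    conv_lhs => rw [Tstk]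
    rw [if_neg hin]
    conv_rhs => rw [nIdx]
    rw [if_neg hin]
    conv_rhs => rw [Tstk]
    rw [if_neg (lt_irrefl n)]
    rfl
  | succ k ih =>
    intro i hik v
    by_cases hin : i < n
    · by_cases h : nums.getD i 0 < v
      · conv_lhs => rw [Tstk]
        rw [if_pos hin, popWhile_cons, if_pos h,
          popWhile_popWhile nums v (nums.getD i 0) (le_of_lt h), ih (i + 1) (by omega) v]
        conv_rhs => rw [nIdx]
        rw [if_pos hin, if_pos h]
      · conv_lhs => rw [Tstk]
        rw [if_pos hin, popWhile_cons, if_neg h]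
        conv_rhs => rw [nIdx]
        rw [if_pos hin, if_neg h]
        conv_rhs => rw [Tstk]
        rw [if_pos hin]
    · conv_lhs => rw [Tstk]
      rw [if_neg hin]
      conv_rhs => rw [nIdx]
      rw [if_neg hin]
      conv_rhs => rw [Tstk]
      rw [if_neg (lt_irrefl n)]
      rfl

theorem nIdx_le (nums : List Int) (n : Nat) (v : Int) :
    ∀ k i, n - i ≤ k → nIdx nums n v i ≤ n := by
  intro k
  induction k with
  | zero =>
    intro i hik
    rw [nIdx]
    by_cases hin : i < n
    · rw [if_pos hin]
      by_cases h : nums.getD i 0 < v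
      · omega
      · rw [if_neg h]; omega
    · rw [if_neg hin]
  | succ k ih =>
    intro i hik
    rw [nIdx]
    by_cases hin : i < n
    · rw [if_pos hin]
      by_cases h : nums.getD i 0 < v
      · rw [if_pos h]; exact ih (i + 1) (by omega)
      · rw [if_neg h]; omega
    · rw [if_neg hin]

theorem rightLoop_nIdx (nums : List Int) (n : Nat) (v : Int) :
    ∀ k r, n - r ≤ k → r < n → rightLoop nums v n r + 1 = nIdx nums n v (r + 1) := by
  intro k
  induction k with
  | zero => intro r hk hr; omega
  | succ k ih =>
    intro r hk hr
    by_cases h : r < n - 1 ∧ nums.getD (r + 1) 0 < v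
    · rw [rightLoop, if_pos h, ih (r + 1) (by omega) (by omega)]
      conv_rhs => rw [nIdx]
      rw [if_pos (show r + 1 < n by omega), if_pos h.2]
    · rw [rightLoop, if_neg h]
      conv_rhs => rw [nIdx]
      by_cases h2 : r + 1 < n
      · have hg : ¬ nums.getD (r + 1) 0 < v := fun hc => h ⟨by omega, hc⟩
        rw [if_pos h2, if_neg hg]
      · rw [if_neg h2]; omega

theorem fwd_eq (nums : List Int) :
    ∀ i, fwd nums i = (Sstk nums i, (List.range i).map (prevVal nums)) := by
  intro i
  induction i with
  | zero => rfl
  | succ i ih =>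
    rw [fwd, ih]
    rw [List.range_succ, List.map_append, List.map_cons, List.map_nil]
    conv_rhs => rw [Sstk]
    rfl

theorem bwd_eq (nums : List Int) (n : Nat) :
    ∀ k i, n - i ≤ k → bwd nums n i = (Tstk nums n i, (List.range' i (n - i)).map (nxtVal nums n)) := by
  intro k
  induction k with
  | zero =>
    intro i hik
    have hin : ¬ i < n := by omega
    rw [bwd, if_neg hin]
    conv_rhs => rw [Tstk]
    rw [if_neg hin, show n - i = 0 by omega]
    rfl
  | succ k ih =>
    intro i hik
    by_cases hin : i < n
    · conv_lhs => rw [bwd]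
      rw [if_pos hin, ih (i + 1) (by omega)]
      conv_rhs => rw [Tstk]
      rw [if_pos hin, show n - i = (n - (i + 1)) + 1 by omega, List.range'_succ, List.map_cons]
      rfl
    · rw [bwd, if_neg hin]
      conv_rhs => rw [Tstk]
      rw [if_neg hin, show n - i = 0 by omega]
      rfl

theorem prevVal_eq (nums : List Int) (k : Nat) :
    prevVal nums k = (leftLoop nums (nums.getD k 0) k : Int) - 1 := by
  rw [prevVal, popWhile_Sstk]
  cases h : leftLoop nums (nums.getD k 0) k with
  | zero => rfl
  | succ m => rw [Sstk]; push_cast; ring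

theorem nxtVal_eq (nums : List Int) (n : Nat) (k : Nat) :
    nxtVal nums n k = (nIdx nums n (nums.getD k 0) (k + 1) : Nat) := by
  rw [nxtVal, popWhile_Tstk nums n (n - (k + 1)) (k + 1) (le_refl _)]
  have hle : nIdx nums n (nums.getD k 0) (k + 1) ≤ n :=
    nIdx_le nums n _ (n - (k + 1)) (k + 1) (le_refl _)
  rcases lt_or_eq_of_le hle with h | h
  · rw [Tstk, if_pos h]
  · rw [Tstk, if_neg (by omega : ¬ nIdx nums n (nums.getD k 0) (k + 1) < n), h]

theorem getD_map_range {α : Type} (f : Nat → α) (n i : Nat) (d : α) (h : i < n) :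
    ((List.range n).map f).getD i d = f i := by
  rw [List.getD_eq_getElem _ _ (by simpa using h)]
  simp

theorem solution_spec_aux (nums : List Int) : solution nums = solution_alt nums := by
  simp only [solution, solution_alt]
  rw [fwd_eq, bwd_eq nums nums.length nums.length 0 (le_refl _)]
  rw [Nat.sub_zero, ← List.range_eq_range']
  refine List.map_congr_left ?_
  intro i hi
  have hin : i < nums.length := List.mem_range.mp hi
  simp only
  rw [getD_map_range _ _ _ _ hin, getD_map_range _ _ _ _ hin,
    prevVal_eq, nxtVal_eq,
    ← rightLoop_nIdx nums nums.length (nums.getD i 0) (nums.length - i) i (le_refl _) hin]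
  push_cast
  ring

-- ===== VERDICT (by name: the statement is the Claim_ definition above) =====
theorem solution_spec : Claim_equal_solution := by
  intro nums _
  unfold Spec_solution
  exact solution_spec_aux nums
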